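-- pv_equiv track=rewrite | github.com/awaykim/Algorithm | 프로그래머스/3/42895. N으로 표현/N으로 표현.py | solution
-- ===== SOURCE A (Python) =====
-- def solution(N, number):
--     answer = -1
--     dp = []
--     for cnt in range(1, 9):
--         cases = set()
--         cases.add(int(str(N) * cnt))
--         for i in range(cnt-1):
--             for op1 in dp[i]:
--                 for op2 in dp[-i-1]:
--                     cases.add(op1 + op2)
--                     cases.add(op1 - op2)
--                     cases.add(op1 * op2)
--                     if op2 != 0:
--                         cases.add(op1 // op2)
--         if number in cases:
--             answer = cnt
--             break
--         dp.append(cases)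
--
--     return answer
-- ===== SOURCE B (Python) =====
-- def solution(N, number):
--     memo = {}
--
--     def reachable(k):
--         if k in memo:
--             return memo[k]
--         vals = {int(str(N) * k)}
--         for i in range(1, k):
--             xs = reachable(i)
--             ys = reachable(k - i)
--             for x in xs:
--                 for y in ys:
--                     vals.add(x + y)
--                     vals.add(x - y)
--                     vals.add(x * y)
--                     if y != 0:
--                         vals.add(x // y)
--         memo[k] = vals
--         return vals
--
--     for k in range(1, 9):
--         if number in reachable(k):
--             return k
--     return -1
-- ===== Notes on version B (the rewrite author's own statement) =====
-- stated objective: alternative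
-- what changed: Replaces A's bottom-up dp list with negative indexing (dp[-i-1]) by a top-down recursion reachable(k) memoized in a dict keyed by the count, queried ascending k=1..8.
import Mathlib
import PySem

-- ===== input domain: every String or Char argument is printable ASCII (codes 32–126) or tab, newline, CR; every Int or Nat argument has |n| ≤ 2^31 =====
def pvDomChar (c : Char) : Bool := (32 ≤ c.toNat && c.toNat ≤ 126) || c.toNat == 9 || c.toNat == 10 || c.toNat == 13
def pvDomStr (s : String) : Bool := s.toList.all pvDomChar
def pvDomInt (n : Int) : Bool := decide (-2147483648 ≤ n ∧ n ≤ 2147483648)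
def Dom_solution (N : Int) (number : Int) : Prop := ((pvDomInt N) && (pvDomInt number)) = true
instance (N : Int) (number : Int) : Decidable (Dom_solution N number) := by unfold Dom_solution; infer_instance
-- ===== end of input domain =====

-- B replaces A's bottom-up dp list (with negative indexing dp[-i-1]) by a top-down
-- memoized recursion reachable(k); same return value, objective: alternative decomposition.

-- ===== PORT A =====

-- int(str(N) * cnt); ofChars? = none is Python's ValueError (excluded by Pre_), so .getD 0 is unreachable under Pre_
def pvRepInt (N : Int) (cnt : Int) : Int :=
  (PySem.Int.ofChars? (PySem.List.pyRepeat (PySem.Int.toChars N) cnt)).getD 0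

-- the body of one 'for cnt' iteration of A: cases = {int(str(N)*cnt)} then the i/op1/op2 loops
-- dp[i] / dp[-i-1] via pyGetD with default ∅; i always indexes in range here, so the default is unreachable
def pvCasesA (N : Int) (cnt : Int) (dp : List (PySem.Set Int)) : PySem.Set Int :=
  (PySem.List.pyRange 0 (cnt - 1)).foldl (fun cases i =>
      let d1 : PySem.Set Int := PySem.List.pyGetD dp i []
      let d2 : PySem.Set Int := PySem.List.pyGetD dp (-i - 1) []
      d1.foldl (fun cases op1 =>
        d2.foldl (fun cases op2 =>
          let cases := PySem.Set.add (PySem.Set.add (PySem.Set.add cases (op1 + op2)) (op1 - op2)) (op1 * op2)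
          if op2 ≠ 0 then PySem.Set.add cases (PySem.Int.floordiv op1 op2) else cases)
        cases)
      cases)
    (PySem.Set.add PySem.Set.empty (pvRepInt N cnt))

-- A's 'for cnt in range(1, 9)' loop with its break and dp.append
def pvLoopA (N : Int) (number : Int) : List Int → List (PySem.Set Int) → Int
  | [], _ => -1
  | cnt :: rest, dp =>
    let cases := pvCasesA N cnt dp
    if number ∈ cases then cnt else pvLoopA N number rest (dp ++ [cases])

def solution (N : Int) (number : Int) : Int :=
  pvLoopA N number (PySem.List.pyRange 1 9) []

-- ===== PORT B =====

-- reachable(k) with the memo dict threaded through (Python mutates the closed-over dict);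
-- 'for i in range(1, k)' is folded as j over List.range (k-1) with i = j+1 (k-i = k-(j+1))
def pvReach (N : Int) (k : Nat) (memo : PySem.Dict Nat (PySem.Set Int)) :
    PySem.Set Int × PySem.Dict Nat (PySem.Set Int) :=
  match memo.get? k with
  | some S => (S, memo)
  | none =>
    let st := (List.range (k - 1)).attach.foldl
      (fun (st : PySem.Set Int × PySem.Dict Nat (PySem.Set Int)) j =>
        let p1 := pvReach N (j.1 + 1) st.2
        let p2 := pvReach N (k - (j.1 + 1)) p1.2
        let vals := p1.1.foldl (fun vals x =>
          p2.1.foldl (fun vals y =>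
            let vals := PySem.Set.add (PySem.Set.add (PySem.Set.add vals (x + y)) (x - y)) (x * y)
            if y ≠ 0 then PySem.Set.add vals (PySem.Int.floordiv x y) else vals)
          vals) st.1
        (vals, p2.2))
      (PySem.Set.add PySem.Set.empty (pvRepInt N (k : Int)), memo)
    (st.1, st.2.insert k st.1)
termination_by k
decreasing_by
  · have := List.mem_range.mp j.2; omega
  · have := List.mem_range.mp j.2; omega

-- B's 'for k in range(1, 9)' loop with its early return
def pvLoopB (N : Int) (number : Int) : List Int → PySem.Dict Nat (PySem.Set Int) → Int
  | [], _ => -1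
  | k :: rest, memo =>
    let p := pvReach N k.toNat memo
    if number ∈ p.1 then k else pvLoopB N number rest p.2

def solution_alt (N : Int) (number : Int) : Int :=
  pvLoopB N number (PySem.List.pyRange 1 9) PySem.Dict.empty

-- ===== PRECONDITION & SPEC =====
-- Pre_ excludes exactly the inputs where Python A raises ValueError: for N < 0, str(N)*cnt
-- (e.g. "-5-5") is not an int literal once cnt ≥ 2, which A reaches unless number = N.
def Pre_solution (N : Int) (number : Int) : Prop := 0 ≤ N ∨ number = N
instance (N : Int) (number : Int) : Decidable (Pre_solution N number) := by unfold Pre_solution; infer_instance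
def pvWitness_solution : Int × Int := (5, 12)

def Spec_solution (N : Int) (number : Int) (out : Int) : Prop := out = solution_alt N number
instance (N : Int) (number : Int) (out : Int) : Decidable (Spec_solution N number out) := by unfold Spec_solution; infer_instance

-- ===== CLAIM (what is proved, stated in full; the proofs are below) =====
def Claim_equal_solution : Prop := ∀ (N : Int) (number : Int), Dom_solution N number → Pre_solution N number → Spec_solution N number (solution N number)

-- ===== LEMMAS AND PROOFS =====

-- the reference value set for count k (both ports compute it)
def pvR (N : Int) (k : Nat) : PySem.Set Int :=
  pvCasesA N (k : Int) ((List.range (k - 1)).attach.map (fun j => pvR N (j.1 + 1)))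
decreasing_by
  have := List.mem_range.mp j.2; omega

lemma pvR_eq (N : Int) (k : Nat) :
    pvR N k = pvCasesA N (k : Int) ((List.range (k - 1)).map (fun j => pvR N (j + 1))) := by
  rw [pvR]; simp

-- the memo is valid: every stored set is the reference set for its key
def pvValid (N : Int) (memo : PySem.Dict Nat (PySem.Set Int)) : Prop :=
  ∀ j S, memo.get? j = some S → S = pvR N j

-- the inner double loop over one (d1, d2) pair (the op1/op2 — x/y — loops of both programs)
def pvComb (vals d1 d2 : PySem.Set Int) : PySem.Set Int :=
  d1.foldl (fun vals x =>
    d2.foldl (fun vals y =>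
      let vals := PySem.Set.add (PySem.Set.add (PySem.Set.add vals (x + y)) (x - y)) (x * y)
      if y ≠ 0 then PySem.Set.add vals (PySem.Int.floordiv x y) else vals)
    vals)
  vals

-- the fold step of pvReach, named (definitionally equal to the lambda in pvReach)
def pvStep (N : Int) (k : Nat) (st : PySem.Set Int × PySem.Dict Nat (PySem.Set Int))
    (j : {j // j ∈ List.range (k - 1)}) : PySem.Set Int × PySem.Dict Nat (PySem.Set Int) :=
  let p1 := pvReach N (j.1 + 1) st.2
  let p2 := pvReach N (k - (j.1 + 1)) p1.2
  let vals := p1.1.foldl (fun vals x =>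
    p2.1.foldl (fun vals y =>
      let vals := PySem.Set.add (PySem.Set.add (PySem.Set.add vals (x + y)) (x - y)) (x * y)
      if y ≠ 0 then PySem.Set.add vals (PySem.Int.floordiv x y) else vals)
    vals) st.1
  (vals, p2.2)

lemma pvReach_some (N : Int) (k : Nat) (memo : PySem.Dict Nat (PySem.Set Int))
    (S : PySem.Set Int) (h : memo.get? k = some S) : pvReach N k memo = (S, memo) := by
  rw [pvReach.eq_def, h]

lemma pvReach_none (N : Int) (k : Nat) (memo : PySem.Dict Nat (PySem.Set Int))
    (h : memo.get? k = none) :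
    pvReach N k memo =
      (let st := (List.range (k - 1)).attach.foldl (pvStep N k)
        (PySem.Set.add PySem.Set.empty (pvRepInt N (k : Int)), memo)
       (st.1, st.2.insert k st.1)) := by
  rw [pvReach.eq_def, h]
  rfl

-- A's cases-building step, with dp holding the reference sets, is the plain fold of pvComb
lemma pvCasesA_eq (N : Int) (k : Nat) :
    pvCasesA N (k : Int) ((List.range (k - 1)).map (fun j => pvR N (j + 1)))
      = (List.range (k - 1)).foldl
          (fun vals j => pvComb vals (pvR N (j + 1)) (pvR N (k - (j + 1))))
          (PySem.Set.add PySem.Set.empty (pvRepInt N (k : Int))) := by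
  cases k with
  | zero =>
      rw [pvCasesA, PySem.List.pyRange_one_eq_nil (by norm_num)]
      simp
  | succ m =>
      rw [pvCasesA]
      have h9 : (((m + 1 : Nat) : Int)) - 1 = ((m : Nat) : Int) := by push_cast; ring
      rw [h9, PySem.List.pyRange_zero_nat, List.foldl_map]
      simp only [Nat.add_sub_cancel]
      refine PySem.List.foldl_congr_mem _ _ _ _ ?_
      intro acc j hj
      have hj' : j < m := List.mem_range.mp hj
      have hlen : (List.map (fun j => pvR N (j + 1)) (List.range m)).length = m := by simp
      have hd1 : PySem.List.pyGetD (List.map (fun j => pvR N (j + 1)) (List.range m))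
          ((j : Int)) ([] : PySem.Set Int) = pvR N (j + 1) := by
        rw [PySem.List.pyGetD_natCast, PySem.List.getD_map_range _ _ _ _ hj']
      have hd2 : PySem.List.pyGetD (List.map (fun j => pvR N (j + 1)) (List.range m))
          (-(j : Int) - 1) ([] : PySem.Set Int) = pvR N (m - j) := by
        have hcast : (-(j : Int) - 1) = -(((j + 1 : Nat) : Int)) := by push_cast; ring
        rw [hcast, PySem.List.pyGetD_neg_natCast _ _ _ (by omega) (by rw [hlen]; omega)]
        simp only [List.getElem_map, List.getElem_range, List.length_map, List.length_range]
        congr 1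
        omega
      simp only [hd1, hd2, Nat.succ_sub_succ]
      rfl

lemma pvR_eq_fold (N : Int) (k : Nat) :
    pvR N k = (List.range (k - 1)).foldl
        (fun vals j => pvComb vals (pvR N (j + 1)) (pvR N (k - (j + 1))))
        (PySem.Set.add PySem.Set.empty (pvRepInt N (k : Int))) := by
  rw [pvR_eq, pvCasesA_eq]

-- the memo-threading fold of pvReach computes the memo-free fold of pvComb, keeping the memo valid
lemma pvReach_fold (N : Int) (k : Nat)
    (IH : ∀ m, m < k → ∀ memo, pvValid N memo →
      (pvReach N m memo).1 = pvR N m ∧ pvValid N (pvReach N m memo).2) :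
    ∀ (l : List {j // j ∈ List.range (k - 1)}) (v : PySem.Set Int)
      (memo : PySem.Dict Nat (PySem.Set Int)), pvValid N memo →
      (l.foldl (pvStep N k) (v, memo)).1
          = l.foldl (fun vals j => pvComb vals (pvR N (j.1 + 1)) (pvR N (k - (j.1 + 1)))) v
        ∧ pvValid N (l.foldl (pvStep N k) (v, memo)).2 := by
  intro l
  induction l with
  | nil => intro v memo hv; exact ⟨rfl, hv⟩
  | cons j l ih =>
      intro v memo hv
      have hjr := List.mem_range.mp j.2
      obtain ⟨h1, hv1⟩ := IH (j.1 + 1) (by omega) memo hv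
      obtain ⟨h2, hv2⟩ := IH (k - (j.1 + 1)) (by omega) _ hv1
      have hstep : pvStep N k (v, memo) j
          = (pvComb v (pvR N (j.1 + 1)) (pvR N (k - (j.1 + 1))),
             (pvReach N (k - (j.1 + 1)) (pvReach N (j.1 + 1) memo).2).2) := by
        show (pvComb v (pvReach N (j.1 + 1) memo).1
                (pvReach N (k - (j.1 + 1)) (pvReach N (j.1 + 1) memo).2).1, _) = _
        rw [h1, h2]
      simp only [List.foldl_cons, hstep]
      exact ih _ _ hv2

lemma pvReach_spec (N : Int) :
    ∀ (k : Nat) (memo : PySem.Dict Nat (PySem.Set Int)), pvValid N memo →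
      (pvReach N k memo).1 = pvR N k ∧ pvValid N (pvReach N k memo).2 := by
  intro k
  induction k using Nat.strong_induction_on with
  | _ k IH =>
    intro memo hv
    rcases h : memo.get? k with _ | S
    · rw [pvReach_none N k memo h]
      obtain ⟨ha, hb⟩ := pvReach_fold N k IH ((List.range (k - 1)).attach)
        (PySem.Set.add PySem.Set.empty (pvRepInt N (k : Int))) memo hv
      have hfold : ((List.range (k - 1)).attach.foldl (pvStep N k)
          (PySem.Set.add PySem.Set.empty (pvRepInt N (k : Int)), memo)).1 = pvR N k := by
        rw [ha, List.foldl_attach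
          (f := fun vals j => pvComb vals (pvR N (j + 1)) (pvR N (k - (j + 1))))]
        exact (pvR_eq_fold N k).symm
      refine ⟨hfold, ?_⟩
      intro j S' h'
      by_cases hkj : j = k
      · subst hkj
        rw [PySem.Dict.get?_insert_self] at h'
        cases h'
        exact hfold.symm ▸ rfl
      · rw [PySem.Dict.get?_insert_of_ne _ _ hkj] at h'
        exact hb j S' h'
    · rw [pvReach_some N k memo S h]
      exact ⟨hv k S h, hv⟩

lemma pvLoop_eq (N : Int) (number : Int) :
    ∀ (n t : Nat) (memo : PySem.Dict Nat (PySem.Set Int)), t + n = 8 → pvValid N memo →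
      pvLoopA N number (PySem.List.pyRange ((t : Int) + 1) 9)
          ((List.range t).map (fun j => pvR N (j + 1)))
        = pvLoopB N number (PySem.List.pyRange ((t : Int) + 1) 9) memo := by
  intro n
  induction n with
  | zero =>
      intro t memo ht hv
      have ht' : t = 8 := by omega
      subst ht'
      rw [PySem.List.pyRange_one_eq_nil (by norm_num)]
      rfl
  | succ n ih =>
      intro t memo ht hv
      have hlt : (t : Int) + 1 < 9 := by omega
      rw [PySem.List.pyRange_one_cons hlt]
      have hc : pvCasesA N ((t : Int) + 1) ((List.range t).map fun j => pvR N (j + 1))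
          = pvR N (t + 1) := by
        have hcast : ((t : Int) + 1) = (((t + 1 : Nat)) : Int) := by push_cast; ring
        have hre := pvR_eq N (t + 1)
        simp only [Nat.add_sub_cancel] at hre
        rw [hcast, hre]
      have htn : ((t : Int) + 1).toNat = t + 1 := by omega
      obtain ⟨h1, hv1⟩ := pvReach_spec N (t + 1) memo hv
      simp only [pvLoopA, pvLoopB, hc, htn, h1]
      by_cases hmem : number ∈ pvR N (t + 1)
      · simp [hmem]
      · simp only [hmem, ite_false]
        have hdp : (List.range t).map (fun j => pvR N (j + 1)) ++ [pvR N (t + 1)]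
            = (List.range (t + 1)).map (fun j => pvR N (j + 1)) := by
          rw [List.range_succ, List.map_append]; rfl
        have hcast2 : (t : Int) + 1 + 1 = ((t + 1 : Nat) : Int) + 1 := by push_cast; ring
        rw [hdp, hcast2]
        exact ih (t + 1) _ (by omega) hv1

-- ===== VERDICT (by name: the statement is the Claim_ definition above) =====
theorem solution_spec : Claim_equal_solution := by
  intro N number _ _
  unfold Spec_solution solution solution_alt
  have h := pvLoop_eq N number 8 0 PySem.Dict.empty (by omega)
    (by intro j S h; simp [PySem.Dict.get?, PySem.Dict.empty] at h)
  simpa using h
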